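-- pv_equiv track=rewrite | github.com/rtorres19/pyevalres | Utility.py | compare_iterables_by_element
-- ===== SOURCE A (Python) =====
-- def compare_iterables_by_element(iter1, iter2):
--     iter1, iter2 = iter(iter1), iter(iter2)
--     for elem1 in iter1:
--         try:
--             elem2 = next(iter2)
--         except StopIteration:  #len(iter2)>len(iter1)
--             return False
--         if elem1!=elem2:  #iter1[i]!=iter2[i]
--             return False
--     try:
--         next(iter2)
--     except StopIteration:  #len(iter2)==len(iter1)
--         return True
--
--     return False  #len(iter2)<len(iter1)
-- ===== SOURCE B (Python) =====
-- def compare_iterables_by_element(iter1, iter2):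
--     # Staged: materialize both, compare lengths, then count mismatches (no early exit).
--     l1, l2 = list(iter1), list(iter2)
--     return len(l1) == len(l2) and sum(a != b for a, b in zip(l1, l2)) == 0
-- ===== Notes on version B (the rewrite author's own statement) =====
-- stated objective: alternative
-- what changed: Replaces A's lazy single pass with manual next()/StopIteration handling and early returns by a staged computation: materialize both iterables, compare lengths, then count all mismatches over zip and test that the count is zero (no early exit).
import Mathlib
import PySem

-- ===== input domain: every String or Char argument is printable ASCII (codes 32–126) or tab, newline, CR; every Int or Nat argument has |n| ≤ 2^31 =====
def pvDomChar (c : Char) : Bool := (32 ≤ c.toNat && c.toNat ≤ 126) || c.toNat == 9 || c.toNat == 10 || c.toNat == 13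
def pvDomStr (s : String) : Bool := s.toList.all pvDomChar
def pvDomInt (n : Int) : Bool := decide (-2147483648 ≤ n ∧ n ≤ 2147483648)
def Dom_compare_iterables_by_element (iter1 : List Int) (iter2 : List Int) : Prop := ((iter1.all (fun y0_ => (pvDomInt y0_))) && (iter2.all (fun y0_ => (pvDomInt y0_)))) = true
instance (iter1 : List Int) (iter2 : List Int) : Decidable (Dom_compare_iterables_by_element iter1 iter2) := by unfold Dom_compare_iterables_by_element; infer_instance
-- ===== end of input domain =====

-- B replaces A's lazy early-exit pass with staged passes: length check, then a full
-- mismatch count over zip tested against zero (alternative decomposition; return value only).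

-- ===== PORT A =====
-- loop over iter1, pulling from iter2 by hand; afterwards probe iter2 once more
def compare_iterables_by_element (iter1 : List Int) (iter2 : List Int) : Bool :=
  match iter1, iter2 with
  | [], i2 =>
      -- final 'next(iter2)' probe: StopIteration → True, else False
      match i2 with
      | [] => true
      | _ :: _ => false
  | elem1 :: t1, i2 =>
      match i2 with
      | [] => false                       -- StopIteration inside the loop
      | elem2 :: t2 =>
          if elem1 ≠ elem2 then false
          else compare_iterables_by_element t1 t2

-- ===== PORT B =====
-- sum(a != b for a, b in zip(l1, l2)): Python sums booleans as ints, so a foldl adding 0/1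
def pvMismatchSum (l1 l2 : List Int) : Int :=
  ((l1.zip l2).foldl (fun acc p => acc + (if p.1 ≠ p.2 then 1 else 0)) 0)

def compare_iterables_by_element_alt (iter1 : List Int) (iter2 : List Int) : Bool :=
  (iter1.length == iter2.length) && (pvMismatchSum iter1 iter2 == 0)

-- ===== PRECONDITION & SPEC =====
def Spec_compare_iterables_by_element (iter1 : List Int) (iter2 : List Int) (out : Bool) : Prop := out = compare_iterables_by_element_alt iter1 iter2
instance (iter1 : List Int) (iter2 : List Int) (out : Bool) : Decidable (Spec_compare_iterables_by_element iter1 iter2 out) := by unfold Spec_compare_iterables_by_element; infer_instance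

-- ===== CLAIM =====
def Claim_equal_compare_iterables_by_element : Prop := ∀ (iter1 : List Int) (iter2 : List Int), Dom_compare_iterables_by_element iter1 iter2 → Spec_compare_iterables_by_element iter1 iter2 (compare_iterables_by_element iter1 iter2)

-- ===== LEMMAS AND PROOFS =====
theorem pv_foldl_shift (l : List (Int × Int)) (c : Int) :
    l.foldl (fun acc p => acc + (if p.1 ≠ p.2 then 1 else 0)) c
      = c + l.foldl (fun acc p => acc + (if p.1 ≠ p.2 then 1 else 0)) 0 := by
  induction l generalizing c with
  | nil => simp
  | cons h t ih =>
      simp only [List.foldl]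
      rw [ih, ih (0 + _)]
      ring

theorem pv_mismatch_cons (a b : Int) (t1 t2 : List Int) :
    pvMismatchSum (a :: t1) (b :: t2)
      = (if a ≠ b then 1 else 0) + pvMismatchSum t1 t2 := by
  simp only [pvMismatchSum, List.zip_cons_cons, List.foldl]
  rw [pv_foldl_shift]
  ring_nf

theorem pv_mismatch_nonneg (l1 l2 : List Int) : 0 ≤ pvMismatchSum l1 l2 := by
  induction l1 generalizing l2 with
  | nil => simp [pvMismatchSum]
  | cons a t1 ih =>
      cases l2 with
      | nil => simp [pvMismatchSum]
      | cons b t2 =>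
          rw [pv_mismatch_cons]
          have := ih t2
          split_ifs <;> omega

theorem pv_eq (iter1 iter2 : List Int) :
    compare_iterables_by_element iter1 iter2 = compare_iterables_by_element_alt iter1 iter2 := by
  induction iter1 generalizing iter2 with
  | nil =>
      cases iter2 <;>
        simp [compare_iterables_by_element, compare_iterables_by_element_alt, pvMismatchSum]
  | cons a t1 ih =>
      cases iter2 with
      | nil =>
          simp [compare_iterables_by_element, compare_iterables_by_element_alt]
      | cons b t2 =>
          by_cases h : a = b
          · simp [compare_iterables_by_element, compare_iterables_by_element_alt, h,
                  pv_mismatch_cons, ih t2]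
          · have hge := pv_mismatch_nonneg t1 t2
            simp [compare_iterables_by_element, compare_iterables_by_element_alt, h,
                  pv_mismatch_cons]
            intro _
            omega

-- ===== VERDICT =====
theorem compare_iterables_by_element_spec : Claim_equal_compare_iterables_by_element := by
  intro iter1 iter2 _
  exact pv_eq iter1 iter2
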